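-- pv_equiv track=rewrite | github.com/naclsn/girl | girl/events/cron.py | _present
-- ===== SOURCE A (Python) =====
-- def _present(ls: list[int] | None):
--     if not ls:
--         return "*"
--     s = ""
--     k = 0
--     while k < len(ls):
--         s += f",{ls[k]}"
--         k += 1
--         if k < len(ls) and ls[k] - 1 == ls[k - 1]:
--             while k < len(ls) and ls[k] - 1 == ls[k - 1]:
--                 k += 1
--             s += f"-{ls[k - 1]}"
--     return s[1:]
-- ===== SOURCE B (Python) =====
-- def _present(ls):
--     if not ls:
--         return "*"
--     # phase 1: group into (first, last) runs of consecutive values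
--     runs = []
--     for v in ls:
--         if runs and v == runs[-1][1] + 1:
--             runs[-1] = (runs[-1][0], v)
--         else:
--             runs.append((v, v))
--     # phase 2: render runs and join
--     return ",".join(str(a) if a == b else f"{a}-{b}" for a, b in runs)
-- ===== Notes on version B (the rewrite author's own statement) =====
-- stated objective: simpler
-- what changed: B replaces A's inline index-driven while-loop with nested inner while and repeated string concatenation (plus a leading-comma slice trick) by a two-phase structure: one scan grouping the list into (first,last) runs, then a render-and-join pass.
import Mathlib
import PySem

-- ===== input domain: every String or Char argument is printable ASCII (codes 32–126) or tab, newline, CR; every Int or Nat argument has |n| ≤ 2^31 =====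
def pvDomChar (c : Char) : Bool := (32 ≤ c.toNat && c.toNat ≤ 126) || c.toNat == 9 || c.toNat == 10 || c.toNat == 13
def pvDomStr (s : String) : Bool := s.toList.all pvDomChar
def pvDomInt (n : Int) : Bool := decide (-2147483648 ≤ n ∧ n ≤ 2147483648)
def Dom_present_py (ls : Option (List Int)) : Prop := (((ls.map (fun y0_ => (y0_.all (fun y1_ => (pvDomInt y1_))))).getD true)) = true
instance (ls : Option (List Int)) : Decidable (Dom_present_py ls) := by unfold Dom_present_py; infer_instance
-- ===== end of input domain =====

-- B: two-phase "group into (first,last) runs, then render and join" instead of A's inline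
-- index-loop string concatenation; same O(n) cost, simpler decomposition.


-- ===== PORT A =====
-- A's inner 'while k < len(ls) and ls[k] - 1 == ls[k - 1]: k += 1' consumed the suffix;
-- ported as structural recursion on the suffix with the previous element as state:
-- returns (ls[k-1] after the loop, remaining suffix).
def pvAdvA (prev : Int) : List Int → Int × List Int
  | [] => (prev, [])
  | y :: t => if y - 1 = prev then pvAdvA y t else (prev, y :: t)

theorem pvAdvA_snd_length_le (prev : Int) (l : List Int) :
    (pvAdvA prev l).2.length ≤ l.length := by
  induction l generalizing prev with
  | nil => simp [pvAdvA]
  | cons y t ih =>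
    simp only [pvAdvA]
    split
    · exact le_trans (ih y) (Nat.le_succ _)
    · exact le_refl _

-- A's outer while loop over k, building the string (as List Char per the PySem convention).
def pvLoopA : List Int → List Char
  | [] => []
  | x :: rest =>
    let s := ',' :: PySem.Int.toChars x          -- s += f",{ls[k]}"
    match rest with
    | [] => s
    | y :: t =>
      if y - 1 = x then                          -- if k < len(ls) and ls[k] - 1 == ls[k-1]
        let p := pvAdvA y t                      -- the inner while
        s ++ ('-' :: PySem.Int.toChars p.1) ++ pvLoopA p.2   -- s += f"-{ls[k-1]}"
      else
        s ++ pvLoopA (y :: t)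
termination_by l => l.length
decreasing_by
  · exact Nat.lt_succ_of_le (le_trans (pvAdvA_snd_length_le y t) (Nat.le_succ _))
  · simp

def present_py (ls : Option (List Int)) : String :=
  match ls with
  | none => "*"                                  -- if not ls: return "*"
  | some l =>
    if l = [] then "*"
    else String.ofList (PySem.List.slice (pvLoopA l) (some 1) none)   -- return s[1:]

-- ===== PORT B =====
-- phase 1 step: extend the last run or start a new one (Source B's for-loop body).
def pvStepB (runs : List (Int × Int)) (v : Int) : List (Int × Int) :=
  match runs.getLast? with
  | some (a, b) => if v = b + 1 then runs.dropLast ++ [(a, v)] else runs ++ [(v, v)]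
  | none => [(v, v)]

-- phase 2: render one run.
def pvRenderB (r : Int × Int) : List Char :=
  if r.1 = r.2 then PySem.Int.toChars r.1
  else PySem.Int.toChars r.1 ++ '-' :: PySem.Int.toChars r.2

def present_py_alt (ls : Option (List Int)) : String :=
  match ls with
  | none => "*"
  | some l =>
    if l = [] then "*"
    else String.ofList (PySem.Chars.join [','] ((l.foldl pvStepB []).map pvRenderB))

-- ===== PRECONDITION & SPEC =====
def Spec_present_py (ls : Option (List Int)) (out : String) : Prop := out = present_py_alt ls
instance (ls : Option (List Int)) (out : String) : Decidable (Spec_present_py ls out) := by unfold Spec_present_py; infer_instance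

-- ===== CLAIM (what is proved, stated in full; the proofs are below) =====
def Claim_equal_present_py : Prop := ∀ (ls : Option (List Int)), Dom_present_py ls → Spec_present_py ls (present_py ls)

-- ===== LEMMAS AND PROOFS =====

-- recursive characterisation of the grouping both programs perform
def pvGroup : List Int → List (Int × Int)
  | [] => []
  | x :: rest => (x, (pvAdvA x rest).1) :: pvGroup (pvAdvA x rest).2
termination_by l => l.length
decreasing_by exact Nat.lt_succ_of_le (pvAdvA_snd_length_le x rest)

theorem pvAdvA_fst_ge (prev : Int) (l : List Int) : prev ≤ (pvAdvA prev l).1 := by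
  induction l generalizing prev with
  | nil => simp [pvAdvA]
  | cons y t ih =>
    simp only [pvAdvA]
    split
    · rename_i h
      exact le_trans (by omega) (ih y)
    · simp

-- B's foldl step only looks at / rewrites the last run, so a nonempty prefix passes through
theorem pvFoldl_shift (l : List Int) (acc rs : List (Int × Int)) (h : rs ≠ []) :
    l.foldl pvStepB (acc ++ rs) = acc ++ l.foldl pvStepB rs := by
  induction l generalizing rs with
  | nil => rfl
  | cons v t ih =>
    simp only [List.foldl_cons]
    obtain ⟨a, b, hab⟩ : ∃ a b, rs.getLast? = some (a, b) := by
      rcases e : rs.getLast? with _ | ⟨a, b⟩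
      · exact absurd (List.getLast?_eq_none_iff.mp e) h
      · exact ⟨a, b, rfl⟩
    have hstep : pvStepB (acc ++ rs) v = acc ++ pvStepB rs v := by
      simp only [pvStepB, List.getLast?_append_of_ne_nil acc h, hab]
      split
      · rw [List.dropLast_append_of_ne_nil h, List.append_assoc]
      · rw [List.append_assoc]
    rw [hstep]
    apply ih
    simp only [pvStepB, hab]
    split <;> simp

theorem pvFoldl_run (rest : List Int) (a b : Int) :
    rest.foldl pvStepB [(a, b)] =
      (a, (pvAdvA b rest).1) :: pvGroup (pvAdvA b rest).2 := by
  induction rest generalizing a b with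
  | nil => simp [pvAdvA, pvGroup]
  | cons y t ih =>
    simp only [List.foldl_cons, pvStepB, List.getLast?_singleton]
    by_cases hy : y = b + 1
    · have h1 : y - 1 = b := by omega
      rw [if_pos hy, List.dropLast_singleton, List.nil_append,
        show pvAdvA b (y :: t) = pvAdvA y t from by simp [pvAdvA, h1]]
      exact ih a y
    · have h1 : ¬ (y - 1 = b) := by omega
      rw [if_neg hy,
        show pvAdvA b (y :: t) = (b, y :: t) from by simp [pvAdvA, h1]]
      rw [pvFoldl_shift t [(a, b)] [(y, y)] (by simp), ih y y, pvGroup]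
      rfl

theorem pvFoldl_eq_group (l : List Int) : l.foldl pvStepB [] = pvGroup l := by
  cases l with
  | nil => simp [pvGroup]
  | cons x rest =>
    simp only [List.foldl_cons, pvStepB, List.getLast?_nil]
    rw [pvFoldl_run, pvGroup]

-- A's loop output is the comma-prefixed render of each group
theorem pvLoopA_eq_flat (l : List Int) :
    pvLoopA l = (pvGroup l).flatMap (fun r => ',' :: pvRenderB r) := by
  induction l using pvLoopA.induct with
  | case1 => simp [pvLoopA, pvGroup]
  | case2 x => simp [pvLoopA, pvGroup, pvAdvA, pvRenderB]
  | case3 y t _p ih =>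
    have ih' : pvLoopA (pvAdvA y t).2 =
        (pvGroup (pvAdvA y t).2).flatMap (fun r => ',' :: pvRenderB r) := ih
    have hadv : pvAdvA (y - 1) (y :: t) = pvAdvA y t := by simp [pvAdvA]
    have hne : ¬ (y - 1 = (pvAdvA y t).1) := by
      have := pvAdvA_fst_ge y t; omega
    simp only [pvLoopA, pvGroup, hadv, List.flatMap_cons, pvRenderB, if_neg hne,
      if_true, ih']
    simp
  | case4 x y t hy ih =>
    have hadv : pvAdvA x (y :: t) = (x, y :: t) := by simp [pvAdvA, hy]
    simp only [pvLoopA, pvGroup, hadv, if_neg hy, List.flatMap_cons,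
      pvRenderB] at ih ⊢
    simp [ih]

-- dropping the leading comma of the flattened form gives the join
theorem pvFlat_eq_comma_join (r : Int × Int) (rs : List (Int × Int)) :
    (r :: rs).flatMap (fun r => ',' :: pvRenderB r) =
      ',' :: PySem.Chars.join [','] ((r :: rs).map pvRenderB) := by
  induction rs generalizing r with
  | nil => simp [PySem.Chars.join_singleton]
  | cons r2 t ih =>
    have h2 := ih r2
    simp only [List.flatMap_cons, List.map_cons] at h2 ⊢
    rw [PySem.Chars.join_cons_cons, h2]
    simp

theorem pvGroup_ne_nil (x : Int) (rest : List Int) : pvGroup (x :: rest) ≠ [] := by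
  rw [pvGroup]; simp

-- ===== VERDICT (by name: the statement is the Claim_ definition above) =====
theorem present_py_spec : Claim_equal_present_py := by
  intro ls _
  unfold Spec_present_py present_py present_py_alt
  cases ls with
  | none => rfl
  | some l =>
    cases l with
    | nil => simp
    | cons x rest =>
      dsimp only
      rw [if_neg (List.cons_ne_nil x rest), if_neg (List.cons_ne_nil x rest)]
      congr 1
      rw [PySem.List.slice_from_one, pvFoldl_eq_group, pvLoopA_eq_flat]
      obtain ⟨r, rs, hg⟩ : ∃ r rs, pvGroup (x :: rest) = r :: rs := by
        rcases e : pvGroup (x :: rest) with _ | ⟨r, rs⟩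
        · exact absurd e (pvGroup_ne_nil x rest)
        · exact ⟨r, rs, rfl⟩
      rw [hg, pvFlat_eq_comma_join]
      rfl
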